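-- pv_equiv track=rewrite | github.com/dylanmarriner/natal-chart-calculator | astrology_readings.py | get_overall_theme
-- ===== SOURCE A (Python) =====
-- def get_overall_theme(transits: dict, horoscope: dict) -> str:
--     """Determine the overall theme for the day"""
--     major_transits = transits.get('major_transits', [])
--     energy_level = horoscope.get('energy_level', 'Moderate')
--     lunar_phase = horoscope.get('lunar_phase', 'full_moon')
--
--     if not major_transits:
--         return f"A relatively calm day with {energy_level.lower()} energy. Focus on daily routines and the {lunar_phase.replace('_', ' ')} energy."
--
--     # Analyze major transit themes
--     themes = []
--     for transit in major_transits[:2]: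
--         if 'sun' in [transit['natal_planet'], transit['transiting_planet']]:
--             themes.append("identity and life purpose")
--         if 'moon' in [transit['natal_planet'], transit['transiting_planet']]:
--             themes.append("emotions and inner needs")
--         if 'venus' in [transit['natal_planet'], transit['transiting_planet']]:
--             themes.append("relationships and values")
--         if 'mars' in [transit['natal_planet'], transit['transiting_planet']]:
--             themes.append("action and initiative")
--         if 'jupiter' in [transit['natal_planet'], transit['transiting_planet']]:
--             themes.append("growth and opportunity")
--
--     if themes:
--         return f"A dynamic day focusing on {', '.join(themes)}. With {energy_level.lower()} energy and {lunar_phase.replace('_', ' ')} influences, significant developments are possible."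
--
--     return f"An active day with {energy_level.lower()} energy. The {lunar_phase.replace('_', ' ')} phase supports your current activities."
-- ===== SOURCE B (Python) =====
-- PLANET_THEMES = {
--     'sun': (0, "identity and life purpose"),
--     'moon': (1, "emotions and inner needs"),
--     'venus': (2, "relationships and values"),
--     'mars': (3, "action and initiative"),
--     'jupiter': (4, "growth and opportunity"),
-- }
--
--
-- def _transit_themes(transit):
--     """Themes for one transit: look up each of its two planets directly in the
--     ranked mapping (no scan over the table), dedupe by rank via a dict, and
--     emit in rank order."""
--     hits = {}
--     for planet in (transit['natal_planet'], transit['transiting_planet']):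
--         if planet in PLANET_THEMES:
--             rank, theme = PLANET_THEMES[planet]
--             hits[rank] = theme
--     return [hits[rank] for rank in sorted(hits)]
--
--
-- def get_overall_theme(transits: dict, horoscope: dict) -> str:
--     """Determine the overall theme for the day"""
--     major_transits = transits.get('major_transits', [])
--     energy = horoscope.get('energy_level', 'Moderate').lower()
--     phase = horoscope.get('lunar_phase', 'full_moon').replace('_', ' ')
--
--     if not major_transits:
--         return f"A relatively calm day with {energy} energy. Focus on daily routines and the {phase} energy."
--
--     themes = [theme
--               for transit in major_transits[:2]
--               for theme in _transit_themes(transit)]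
--
--     if themes:
--         return f"A dynamic day focusing on {', '.join(themes)}. With {energy} energy and {phase} influences, significant developments are possible."
--
--     return f"An active day with {energy} energy. The {phase} phase supports your current activities."
-- ===== Notes on version B (the rewrite author's own statement) =====
-- stated objective: alternative
-- what changed: Instead of scanning five hard-coded ifs per transit, B looks each of the transit's two planets up directly in a planet->(rank,theme) mapping, dedupes hits by rank in a dict, and emits the themes in sorted rank order (lookup-and-sort join inverted from A's table scan).
import Mathlib
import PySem

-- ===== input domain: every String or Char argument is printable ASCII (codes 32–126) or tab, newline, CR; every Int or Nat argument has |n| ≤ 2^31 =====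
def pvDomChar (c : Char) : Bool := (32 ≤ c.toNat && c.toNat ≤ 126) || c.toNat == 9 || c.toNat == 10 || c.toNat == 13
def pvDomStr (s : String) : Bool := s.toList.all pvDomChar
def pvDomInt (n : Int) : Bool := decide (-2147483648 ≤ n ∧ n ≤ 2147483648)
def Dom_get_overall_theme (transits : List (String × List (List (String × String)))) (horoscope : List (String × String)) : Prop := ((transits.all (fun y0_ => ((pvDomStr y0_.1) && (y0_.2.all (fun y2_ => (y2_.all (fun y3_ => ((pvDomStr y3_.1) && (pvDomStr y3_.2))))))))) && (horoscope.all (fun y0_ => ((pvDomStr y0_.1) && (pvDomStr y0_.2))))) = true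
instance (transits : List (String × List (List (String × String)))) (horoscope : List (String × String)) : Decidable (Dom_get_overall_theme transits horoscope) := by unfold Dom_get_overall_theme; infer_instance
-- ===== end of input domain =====

-- B inverts A's per-transit table scan: it looks the transit's two planets up in a
-- planet→(rank,theme) mapping, dedupes hits by rank in a dict, and emits themes in
-- sorted rank order (alternative decomposition, same cost).

-- ===== PORT A =====
def get_overall_theme (transits : List (String × List (List (String × String)))) (horoscope : List (String × String)) : String :=
  let major_transits := PySem.Dict.getD (PySem.Dict.mk transits) "major_transits" []
  let energy_level := PySem.Dict.getD (PySem.Dict.mk horoscope) "energy_level" "Moderate"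
  let lunar_phase := PySem.Dict.getD (PySem.Dict.mk horoscope) "lunar_phase" "full_moon"
  if major_transits = [] then
    "A relatively calm day with " ++ PySem.Str.lower energy_level ++
      " energy. Focus on daily routines and the " ++
      PySem.Str.replace lunar_phase "_" " " ++ " energy."
  else
    -- transit['natal_planet'] / ['transiting_planet'] raise KeyError when absent;
    -- Pre_ guarantees both keys, so the total getD form is exact there.
    let themes := (PySem.List.slice major_transits none (some 2)).foldl
      (fun themes transit =>
        let np := PySem.Dict.getD (PySem.Dict.mk transit) "natal_planet" ""
        let tp := PySem.Dict.getD (PySem.Dict.mk transit) "transiting_planet" ""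
        let themes := if "sun" ∈ [np, tp] then themes ++ ["identity and life purpose"] else themes
        let themes := if "moon" ∈ [np, tp] then themes ++ ["emotions and inner needs"] else themes
        let themes := if "venus" ∈ [np, tp] then themes ++ ["relationships and values"] else themes
        let themes := if "mars" ∈ [np, tp] then themes ++ ["action and initiative"] else themes
        let themes := if "jupiter" ∈ [np, tp] then themes ++ ["growth and opportunity"] else themes
        themes) []
    if themes ≠ [] then
      "A dynamic day focusing on " ++ PySem.Str.join ", " themes ++
        ". With " ++ PySem.Str.lower energy_level ++ " energy and " ++
        PySem.Str.replace lunar_phase "_" " " ++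
        " influences, significant developments are possible."
    else
      "An active day with " ++ PySem.Str.lower energy_level ++ " energy. The " ++
        PySem.Str.replace lunar_phase "_" " " ++ " phase supports your current activities."

-- ===== PORT B =====
def pvPlanetThemes : List (String × (Int × String)) :=
  [("sun", (0, "identity and life purpose")),
   ("moon", (1, "emotions and inner needs")),
   ("venus", (2, "relationships and values")),
   ("mars", (3, "action and initiative")),
   ("jupiter", (4, "growth and opportunity"))]

-- _transit_themes: look each of the transit's two planets up in the mapping,
-- dedupe by rank in a dict, emit in sorted rank order.
def pvTransitThemes (transit : List (String × String)) : List String :=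
  let hits : PySem.Dict Int String :=
    [PySem.Dict.getD (PySem.Dict.mk transit) "natal_planet" "",
     PySem.Dict.getD (PySem.Dict.mk transit) "transiting_planet" ""].foldl
      (fun hits planet =>
        match PySem.Dict.get? (PySem.Dict.mk pvPlanetThemes) planet with
        | some rt => PySem.Dict.insert hits rt.1 rt.2
        | none => hits) PySem.Dict.empty
  (PySem.List.sorted (PySem.Dict.keys hits) (fun r => r) false).map
    (fun r => PySem.Dict.getD hits r "")

def get_overall_theme_alt (transits : List (String × List (List (String × String)))) (horoscope : List (String × String)) : String :=
  let major_transits := PySem.Dict.getD (PySem.Dict.mk transits) "major_transits" []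
  let energy := PySem.Str.lower (PySem.Dict.getD (PySem.Dict.mk horoscope) "energy_level" "Moderate")
  let phase := PySem.Str.replace (PySem.Dict.getD (PySem.Dict.mk horoscope) "lunar_phase" "full_moon") "_" " "
  if major_transits = [] then
    "A relatively calm day with " ++ energy ++
      " energy. Focus on daily routines and the " ++ phase ++ " energy."
  else
    let themes := (PySem.List.slice major_transits none (some 2)).flatMap pvTransitThemes
    if themes ≠ [] then
      "A dynamic day focusing on " ++ PySem.Str.join ", " themes ++
        ". With " ++ energy ++ " energy and " ++ phase ++
        " influences, significant developments are possible."
    else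
      "An active day with " ++ energy ++ " energy. The " ++ phase ++
        " phase supports your current activities."

-- ===== PRECONDITION & SPEC =====
-- Pre_ excludes exactly the inputs where A raises KeyError: a transit among the first
-- two of major_transits missing the 'natal_planet' or 'transiting_planet' key.
def Pre_get_overall_theme (transits : List (String × List (List (String × String)))) (horoscope : List (String × String)) : Prop :=
  ∀ t ∈ PySem.List.slice (PySem.Dict.getD (PySem.Dict.mk transits) "major_transits" []) none (some 2),
    (PySem.Dict.get? (PySem.Dict.mk t) "natal_planet").isSome = true ∧
    (PySem.Dict.get? (PySem.Dict.mk t) "transiting_planet").isSome = true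
instance (transits : List (String × List (List (String × String)))) (horoscope : List (String × String)) : Decidable (Pre_get_overall_theme transits horoscope) := by unfold Pre_get_overall_theme; infer_instance

def pvWitness_get_overall_theme : (List (String × List (List (String × String)))) × (List (String × String)) :=
  ([("major_transits", [[("natal_planet", "sun"), ("transiting_planet", "mars")]])],
   [("energy_level", "High")])

def Spec_get_overall_theme (transits : List (String × List (List (String × String)))) (horoscope : List (String × String)) (out : String) : Prop := out = get_overall_theme_alt transits horoscope
instance (transits : List (String × List (List (String × String)))) (horoscope : List (String × String)) (out : String) : Decidable (Spec_get_overall_theme transits horoscope out) := by unfold Spec_get_overall_theme; infer_instance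

-- ===== CLAIM (what is proved, stated in full; the proofs are below) =====
def Claim_equal_get_overall_theme : Prop := ∀ (transits : List (String × List (List (String × String)))) (horoscope : List (String × String)), Dom_get_overall_theme transits horoscope → Pre_get_overall_theme transits horoscope → Spec_get_overall_theme transits horoscope (get_overall_theme transits horoscope)

-- ===== LEMMAS AND PROOFS =====

-- A's five-if append chain over one transit produces exactly B's ranked-lookup selection.
set_option maxHeartbeats 2000000 in
theorem pv_pair_eq (acc : List String) (np tp : String) :
    (let t1 := if "sun" ∈ [np, tp] then acc ++ ["identity and life purpose"] else acc
     let t2 := if "moon" ∈ [np, tp] then t1 ++ ["emotions and inner needs"] else t1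
     let t3 := if "venus" ∈ [np, tp] then t2 ++ ["relationships and values"] else t2
     let t4 := if "mars" ∈ [np, tp] then t3 ++ ["action and initiative"] else t3
     let t5 := if "jupiter" ∈ [np, tp] then t4 ++ ["growth and opportunity"] else t4
     t5)
    = acc ++
      (let hits : PySem.Dict Int String := [np, tp].foldl
         (fun hits planet =>
           match PySem.Dict.get? (PySem.Dict.mk pvPlanetThemes) planet with
           | some rt => PySem.Dict.insert hits rt.1 rt.2
           | none => hits) PySem.Dict.empty
       (PySem.List.sorted (PySem.Dict.keys hits) (fun r => r) false).map
         (fun r => PySem.Dict.getD hits r "")) := by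
  have hnp : np = "sun" ∨ np = "moon" ∨ np = "venus" ∨ np = "mars" ∨ np = "jupiter" ∨
      (np ≠ "sun" ∧ np ≠ "moon" ∧ np ≠ "venus" ∧ np ≠ "mars" ∧ np ≠ "jupiter") := by tauto
  have htp : tp = "sun" ∨ tp = "moon" ∨ tp = "venus" ∨ tp = "mars" ∨ tp = "jupiter" ∨
      (tp ≠ "sun" ∧ tp ≠ "moon" ∧ tp ≠ "venus" ∧ tp ≠ "mars" ∧ tp ≠ "jupiter") := by tauto
  rcases hnp with rfl | rfl | rfl | rfl | rfl | ⟨n1, n2, n3, n4, n5⟩ <;>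
    rcases htp with rfl | rfl | rfl | rfl | rfl | ⟨g1, g2, g3, g4, g5⟩ <;>
    (try (have n1' : ¬"sun" = np := fun h => n1 h.symm
          have n2' : ¬"moon" = np := fun h => n2 h.symm
          have n3' : ¬"venus" = np := fun h => n3 h.symm
          have n4' : ¬"mars" = np := fun h => n4 h.symm
          have n5' : ¬"jupiter" = np := fun h => n5 h.symm)) <;>
    (try (have g1' : ¬"sun" = tp := fun h => g1 h.symm
          have g2' : ¬"moon" = tp := fun h => g2 h.symm
          have g3' : ¬"venus" = tp := fun h => g3 h.symm
          have g4' : ¬"mars" = tp := fun h => g4 h.symm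
          have g5' : ¬"jupiter" = tp := fun h => g5 h.symm)) <;>
    (try simp_all [pvPlanetThemes, PySem.Dict.get?, PySem.Dict.insert, PySem.Dict.keys,
      PySem.Dict.getD, PySem.Dict.empty, PySem.List.sorted, PySem.List.insertBy])

theorem pv_step_eq (acc : List String) (transit : List (String × String)) :
    (let np := PySem.Dict.getD (PySem.Dict.mk transit) "natal_planet" ""
     let tp := PySem.Dict.getD (PySem.Dict.mk transit) "transiting_planet" ""
     let t1 := if "sun" ∈ [np, tp] then acc ++ ["identity and life purpose"] else acc
     let t2 := if "moon" ∈ [np, tp] then t1 ++ ["emotions and inner needs"] else t1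
     let t3 := if "venus" ∈ [np, tp] then t2 ++ ["relationships and values"] else t2
     let t4 := if "mars" ∈ [np, tp] then t3 ++ ["action and initiative"] else t3
     let t5 := if "jupiter" ∈ [np, tp] then t4 ++ ["growth and opportunity"] else t4
     t5)
    = acc ++ pvTransitThemes transit := by
  exact pv_pair_eq acc _ _

-- ===== VERDICT (by name: the statement is the Claim_ definition above) =====
theorem get_overall_theme_spec : Claim_equal_get_overall_theme := by
  intro transits horoscope _ _
  unfold Spec_get_overall_theme get_overall_theme get_overall_theme_alt
  have hf : (fun (themes : List String) (transit : List (String × String)) =>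
      let np := PySem.Dict.getD (PySem.Dict.mk transit) "natal_planet" ""
      let tp := PySem.Dict.getD (PySem.Dict.mk transit) "transiting_planet" ""
      let themes := if "sun" ∈ [np, tp] then themes ++ ["identity and life purpose"] else themes
      let themes := if "moon" ∈ [np, tp] then themes ++ ["emotions and inner needs"] else themes
      let themes := if "venus" ∈ [np, tp] then themes ++ ["relationships and values"] else themes
      let themes := if "mars" ∈ [np, tp] then themes ++ ["action and initiative"] else themes
      let themes := if "jupiter" ∈ [np, tp] then themes ++ ["growth and opportunity"] else themes
      themes)
      = (fun themes transit => themes ++ pvTransitThemes transit) := by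
    funext a t; exact pv_step_eq a t
  simp only [hf, PySem.List.foldl_append_eq_flatMap, List.nil_append]
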